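-- pv_equiv track=rewrite | github.com/srishtayal/nalum | ez-parse/Resume-Parser/parser.py | get_contact
-- ===== SOURCE A (Python) =====
-- TAGS = {
--     "Contact",
--     "Top Skills",
--     "Certifications",
--     "Honors-Awards",
--     "Publications",
--     "Summary",
--     "Languages",
--     "Experience",
--     "Education",
-- }
--
-- def get_contact(result_list, i):
--     contact = []
--     for j in range(i + 1, len(result_list)):
--         if not result_list[j][0]:
--             continue
--         elif "Page" in result_list[j][0]:
--             continue
--         elif result_list[j][0] not in TAGS:
--             contact.append(result_list[j][0].strip())
--         else:
--             return contact, j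
--     return contact, len(result_list)
-- ===== SOURCE B (Python) =====
-- TAGS = {
--     "Contact",
--     "Top Skills",
--     "Certifications",
--     "Honors-Awards",
--     "Publications",
--     "Summary",
--     "Languages",
--     "Experience",
--     "Education",
-- }
--
-- def get_contact(result_list, i):
--     n = len(result_list)
--     b = next((j for j in range(i + 1, n)
--               if result_list[j][0] and "Page" not in result_list[j][0]
--               and result_list[j][0] in TAGS), n)
--     contact = [line[0].strip() for line in result_list[i + 1:b]
--                if line[0] and "Page" not in line[0]]
--     return contact, b
-- ===== Notes on version B (the rewrite author's own statement) =====
-- stated objective: alternative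
-- what changed: A fuses boundary detection and line collection into one early-returning loop; B first finds the boundary index b (first non-empty, Page-free section tag via next() over a generator) and then builds the contact list by a filtered comprehension over the slice result_list[i+1:b].
-- outside the precondition, e.g. on get_contact([['x'], ['y']], -3): A returns (['x', 'y', 'x', 'y'], 2), B returns (['x', 'y'], 2); on get_contact([['Contact'], []], -1): A returns ([], 0), B returns ([], 0)
import Mathlib
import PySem

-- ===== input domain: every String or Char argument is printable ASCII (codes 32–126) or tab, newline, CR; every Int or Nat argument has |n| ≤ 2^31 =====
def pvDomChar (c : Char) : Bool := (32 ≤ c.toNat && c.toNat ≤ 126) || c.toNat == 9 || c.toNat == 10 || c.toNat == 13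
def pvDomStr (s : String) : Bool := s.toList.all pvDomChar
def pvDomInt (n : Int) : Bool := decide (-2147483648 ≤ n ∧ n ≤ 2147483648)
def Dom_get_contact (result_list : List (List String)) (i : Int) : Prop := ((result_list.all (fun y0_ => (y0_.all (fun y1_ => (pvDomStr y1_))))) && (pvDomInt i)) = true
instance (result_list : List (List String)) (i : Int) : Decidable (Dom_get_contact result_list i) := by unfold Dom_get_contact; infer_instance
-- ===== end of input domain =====

-- B separates boundary-finding (first section tag) from line-collection (filterMap over a slice)
-- instead of A's fused early-returning loop; same O(n) cost, different decomposition.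

-- ===== PORT A =====
-- the module constant TAGS (a set of string literals, shared by both programs)
def pvTAGS : List String :=
  ["Contact", "Top Skills", "Certifications", "Honors-Awards", "Publications",
   "Summary", "Languages", "Experience", "Education"]

-- A's fused loop over j in range(i+1, len(result_list)); the `none` branches are
-- Python's IndexError on result_list[j][0], excluded by Pre_get_contact.
def get_contact_loop (rl : List (List String)) (contact : List String) :
    List Int → List String × Int
  | [] => (contact, (rl.length : Int))
  | j :: js =>
    match PySem.List.pyGet? rl j with
    | none => (contact, j)  -- IndexError, outside Pre_
    | some row =>
      match PySem.List.pyGet? row 0 with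
      | none => (contact, j)  -- IndexError, outside Pre_
      | some s =>
        if s = "" then get_contact_loop rl contact js
        else if PySem.Str.isIn "Page" s then get_contact_loop rl contact js
        else if s ∉ pvTAGS then get_contact_loop rl (contact ++ [PySem.Str.strip s]) js
        else (contact, j)

def get_contact (result_list : List (List String)) (i : Int) : List String × Int :=
  get_contact_loop result_list [] (PySem.List.pyRange (i + 1) result_list.length 1)

-- ===== PORT B =====
def get_contact_alt (result_list : List (List String)) (i : Int) : List String × Int :=
  let n : Int := (result_list.length : Int)
  -- b = next((j for j in range(i+1, n) if rl[j][0] and "Page" not in rl[j][0] and rl[j][0] in TAGS), n)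
  let b : Int :=
    ((PySem.List.pyRange (i + 1) n 1).find? (fun j =>
        match (PySem.List.pyGet? result_list j).bind (fun row => PySem.List.pyGet? row 0) with
        | none => false
        | some s => s ≠ "" && !(PySem.Str.isIn "Page" s) && decide (s ∈ pvTAGS))).getD n
  -- contact = [line[0].strip() for line in result_list[i+1:b] if line[0] and "Page" not in line[0]]
  let contact : List String :=
    (PySem.List.slice result_list (some (i + 1)) (some b)).filterMap (fun row =>
      match PySem.List.pyGet? row 0 with
      | none => none  -- IndexError, outside Pre_
      | some s =>
        if s ≠ "" && !(PySem.Str.isIn "Page" s) then some (PySem.Str.strip s) else none)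
  (contact, b)

-- ===== PRECONDITION & SPEC =====
-- Pre_ restricts to the function's natural domain: i ≥ -1 (a more negative i makes Python's
-- range indices wrap around the list — a section index is never negative in the caller) and no
-- empty inner list at a position > i, where A's result_list[j][0] would raise IndexError unless
-- a section tag happens to come first.
def Pre_get_contact (result_list : List (List String)) (i : Int) : Prop :=
  -1 ≤ i ∧ ∀ row ∈ result_list.drop (i + 1).toNat, row ≠ []
instance (result_list : List (List String)) (i : Int) : Decidable (Pre_get_contact result_list i) := by
  unfold Pre_get_contact; infer_instance

def pvWitness_get_contact : List (List String) × Int := ([["John"], ["Education"]], -1)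

def Spec_get_contact (result_list : List (List String)) (i : Int) (out : List String × Int) : Prop :=
  out = get_contact_alt result_list i
instance (result_list : List (List String)) (i : Int) (out : List String × Int) : Decidable (Spec_get_contact result_list i out) := by
  unfold Spec_get_contact; infer_instance

-- ===== CLAIM (what is proved, stated in full; the proofs are below) =====
def Claim_equal_get_contact : Prop := ∀ (result_list : List (List String)) (i : Int), Dom_get_contact result_list i → Pre_get_contact result_list i → Spec_get_contact result_list i (get_contact result_list i)

-- ===== LEMMAS AND PROOFS =====

-- canonical form of the traversal: one structural pass over the suffix result_list.drop k;
-- both ports are reduced to it under Pre_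
def pvCanon (total : Int) : List (List String) → Nat → List String → List String × Int
  | [], _, acc => (acc, total)
  | row :: rest, k, acc =>
    let s := row.headD ""
    if s = "" then pvCanon total rest (k + 1) acc
    else if PySem.Str.isIn "Page" s then pvCanon total rest (k + 1) acc
    else if s ∉ pvTAGS then pvCanon total rest (k + 1) (acc ++ [PySem.Str.strip s])
    else (acc, (k : Int))

lemma loopA_eq_canon (rl : List (List String)) :
    ∀ (fuel k : Nat) (acc : List String), rl.length - k ≤ fuel →
      (∀ row ∈ rl.drop k, row ≠ []) →
      get_contact_loop rl acc (PySem.List.pyRange (k : Int) (rl.length : Int) 1) =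
        pvCanon (rl.length : Int) (rl.drop k) k acc := by
  intro fuel
  induction fuel with
  | zero =>
    intro k acc hle _
    have hk : rl.length ≤ k := by omega
    rw [PySem.List.pyRange_one_eq_nil (by exact_mod_cast hk), List.drop_eq_nil_of_le hk]
    rfl
  | succ fuel ih =>
    intro k acc hle hrows
    cases hd : rl.drop k with
    | nil =>
      have hk : rl.length ≤ k := List.drop_eq_nil_iff.1 hd
      rw [PySem.List.pyRange_one_eq_nil (by exact_mod_cast hk)]
      rfl
    | cons row rest =>
      have hk : k < rl.length := by
        by_contra hc
        rw [List.drop_eq_nil_of_le (by omega)] at hd; simp at hd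
      have hget : PySem.List.pyGet? rl (k : Int) = some row := by
        rw [PySem.List.pyGet?_natCast, ← List.head?_drop, hd]; rfl
      have hdrop1 : rl.drop (k + 1) = rest := by
        rw [List.drop_add_one_eq_tail_drop, hd]; rfl
      have hrows' : ∀ r ∈ rl.drop (k + 1), r ≠ [] := by
        rw [hdrop1]; intro r hr
        exact hrows r (by rw [hd]; exact List.mem_cons_of_mem _ hr)
      have hrow : row ≠ [] := hrows row (by rw [hd]; exact List.mem_cons_self)
      obtain ⟨a, as, rfl⟩ : ∃ a as, row = a :: as := by
        cases row with
        | nil => exact absurd rfl hrow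
        | cons a as => exact ⟨a, as, rfl⟩
      rw [PySem.List.pyRange_one_cons (by exact_mod_cast hk)]
      have hcast : ((k : Int) + 1) = ((k + 1 : Nat) : Int) := by push_cast; ring
      simp only [get_contact_loop, hget, PySem.List.pyGet?_zero_cons, pvCanon, List.headD_cons,
        hcast]
      split_ifs with h1 h2 h3
      · rw [← hdrop1]; exact ih (k + 1) acc (by omega) hrows'
      · rw [← hdrop1]; exact ih (k + 1) acc (by omega) hrows'
      · rfl
      · rw [← hdrop1]; exact ih (k + 1) (acc ++ [PySem.Str.strip a]) (by omega) hrows'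

def pvP (rl : List (List String)) : Int → Bool := fun j =>
  match (PySem.List.pyGet? rl j).bind (fun row => PySem.List.pyGet? row 0) with
  | none => false
  | some s => s ≠ "" && !(PySem.Str.isIn "Page" s) && decide (s ∈ pvTAGS)

def pvF : List String → Option String := fun row =>
  match PySem.List.pyGet? row 0 with
  | none => none
  | some s => if s ≠ "" && !(PySem.Str.isIn "Page" s) then some (PySem.Str.strip s) else none

def pvB (rl : List (List String)) (start : Int) : Int :=
  ((PySem.List.pyRange start (rl.length : Int) 1).find? (pvP rl)).getD (rl.length : Int)

lemma pvB_ge (rl : List (List String)) (s : Int) (h : s ≤ (rl.length : Int)) : s ≤ pvB rl s := by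
  unfold pvB
  cases hf : (PySem.List.pyRange s (rl.length : Int) 1).find? (pvP rl) with
  | none => simpa using h
  | some j =>
    have hm := List.mem_of_find?_eq_some hf
    have := (PySem.List.mem_pyRange_one).1 hm
    simpa using this.1

lemma altB_eq_canon (rl : List (List String)) :
    ∀ (fuel k : Nat) (acc : List String), rl.length - k ≤ fuel →
      (∀ row ∈ rl.drop k, row ≠ []) →
      (acc ++ (PySem.List.slice rl (some (k : Int)) (some (pvB rl (k : Int)))).filterMap pvF,
        pvB rl (k : Int)) =
        pvCanon (rl.length : Int) (rl.drop k) k acc := by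
  intro fuel
  induction fuel with
  | zero =>
    intro k acc hle _
    have hk : rl.length ≤ k := by omega
    have hb : pvB rl (k : Int) = (rl.length : Int) := by
      unfold pvB
      rw [PySem.List.pyRange_one_eq_nil (by exact_mod_cast hk)]
      rfl
    rw [hb, PySem.List.slice_toNat rl (Int.natCast_nonneg _) (Int.natCast_nonneg _),
      List.drop_eq_nil_of_le (by simpa using hk)]
    simp [pvCanon, List.drop_eq_nil_of_le hk]
  | succ fuel ih =>
    intro k acc hle hrows
    cases hd : rl.drop k with
    | nil =>
      have hk : rl.length ≤ k := List.drop_eq_nil_iff.1 hd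
      have hb : pvB rl (k : Int) = (rl.length : Int) := by
        unfold pvB
        rw [PySem.List.pyRange_one_eq_nil (by exact_mod_cast hk)]
        rfl
      rw [hb, PySem.List.slice_toNat rl (Int.natCast_nonneg _) (Int.natCast_nonneg _),
        List.drop_eq_nil_of_le (by simpa using hk)]
      simp [pvCanon]
    | cons row rest =>
      have hk : k < rl.length := by
        by_contra hc
        rw [List.drop_eq_nil_of_le (by omega)] at hd; simp at hd
      have hget : PySem.List.pyGet? rl (k : Int) = some row := by
        rw [PySem.List.pyGet?_natCast, ← List.head?_drop, hd]; rfl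
      have hdrop1 : rl.drop (k + 1) = rest := by
        rw [List.drop_add_one_eq_tail_drop, hd]; rfl
      have hrows' : ∀ r ∈ rl.drop (k + 1), r ≠ [] := by
        rw [hdrop1]; intro r hr
        exact hrows r (by rw [hd]; exact List.mem_cons_of_mem _ hr)
      have hrow : row ≠ [] := hrows row (by rw [hd]; exact List.mem_cons_self)
      obtain ⟨a, as, rfl⟩ : ∃ a as, row = a :: as := by
        cases row with
        | nil => exact absurd rfl hrow
        | cons a as => exact ⟨a, as, rfl⟩
      have hcast : ((k : Int) + 1) = ((k + 1 : Nat) : Int) := by push_cast; ring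
      have hpk : pvP rl (k : Int) =
          (a ≠ "" && !(PySem.Str.isIn "Page" a) && decide (a ∈ pvTAGS)) := by
        simp only [pvP, hget, Option.bind_some, PySem.List.pyGet?_zero_cons]
      have hrangecons : PySem.List.pyRange (k : Int) (rl.length : Int) 1 =
          (k : Int) :: PySem.List.pyRange ((k + 1 : Nat) : Int) (rl.length : Int) 1 := by
        rw [PySem.List.pyRange_one_cons (by exact_mod_cast hk), hcast]
      -- the "no boundary at k" step, shared by the three non-tag branches
      have step : pvP rl (k : Int) = false →
          ∀ accN : List String,
            (acc ++ (pvF (a :: as)).toList ++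
                (PySem.List.slice rl (some ((k + 1 : Nat) : Int))
                  (some (pvB rl ((k + 1 : Nat) : Int)))).filterMap pvF = accN ++
                (PySem.List.slice rl (some ((k + 1 : Nat) : Int))
                  (some (pvB rl ((k + 1 : Nat) : Int)))).filterMap pvF) →
            (acc ++ (PySem.List.slice rl (some (k : Int)) (some (pvB rl (k : Int)))).filterMap pvF,
              pvB rl (k : Int)) = pvCanon (rl.length : Int) rest (k + 1) accN := by
        intro hpkf accN hacc
        have hb : pvB rl (k : Int) = pvB rl ((k + 1 : Nat) : Int) := by
          unfold pvB
          rw [hrangecons, List.find?_cons_of_neg (by simp [hpkf])]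
        have hbge : ((k + 1 : Nat) : Int) ≤ pvB rl ((k + 1 : Nat) : Int) :=
          pvB_ge rl _ (by exact_mod_cast hk)
        have hbnn : (0 : Int) ≤ pvB rl ((k + 1 : Nat) : Int) :=
          le_trans (Int.natCast_nonneg _) hbge
        have hslice : PySem.List.slice rl (some (k : Int)) (some (pvB rl ((k + 1 : Nat) : Int))) =
            (a :: as) :: PySem.List.slice rl (some ((k + 1 : Nat) : Int))
              (some (pvB rl ((k + 1 : Nat) : Int))) := by
          rw [PySem.List.slice_toNat rl (Int.natCast_nonneg _) hbnn,
            PySem.List.slice_toNat rl (Int.natCast_nonneg _) hbnn]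
          simp only [Int.toNat_natCast]
          rw [hd, hdrop1]
          have h1 : (pvB rl ((k + 1 : Nat) : Int)).toNat - k =
              ((pvB rl ((k + 1 : Nat) : Int)).toNat - (k + 1)) + 1 := by
            have : (k + 1 : Nat) ≤ (pvB rl ((k + 1 : Nat) : Int)).toNat := by omega
            omega
          rw [h1, List.take_succ_cons]
        have hfmc : ∀ (x : List String) (l : List (List String)),
            List.filterMap pvF (x :: l) = (pvF x).toList ++ List.filterMap pvF l := by
          intro x l; cases h : pvF x <;> simp [h]
        rw [hb, hslice, hfmc, ← List.append_assoc, hacc, ← hdrop1]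
        exact ih (k + 1) accN (by omega) hrows'
      by_cases h1 : a = ""
      · -- empty line: skipped by both
        rw [pvCanon]
        simp only [List.headD_cons, if_pos h1]
        refine step (by rw [hpk]; simp [h1]) acc ?_
        have hf : pvF (a :: as) = none := by
          simp [pvF, h1]
        simp [hf]
      · rcases hIs : PySem.Str.isIn "Page" a with _ | _
        · -- no "Page": tag or collected
          by_cases h3 : a ∈ pvTAGS
          · -- boundary found at k
            have hb : pvB rl (k : Int) = (k : Int) := by
              unfold pvB
              rw [hrangecons, List.find?_cons_of_pos (by rw [hpk, hIs]; simp [h1, h3])]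
              rfl
            have hslice : PySem.List.slice rl (some (k : Int)) (some (k : Int)) = [] := by
              rw [PySem.List.slice_toNat rl (Int.natCast_nonneg _) (Int.natCast_nonneg _)]
              simp
            rw [hb, hslice, pvCanon]
            simp only [List.headD_cons, List.filterMap_nil, List.append_nil]
            rw [if_neg h1, if_neg (by rw [hIs]; simp), if_neg (by simp [h3])]
          · -- ordinary contact line: collected by both
            rw [pvCanon]
            simp only [List.headD_cons]
            rw [if_neg h1, if_neg (by rw [hIs]; simp), if_pos h3]
            refine step (by rw [hpk]; simp [h3]) (acc ++ [PySem.Str.strip a]) ?_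
            have hf : pvF (a :: as) = some (PySem.Str.strip a) := by
              have hIs' : PySem.Chars.isIn ['P','a','g','e'] a.toList = false := by
                simpa using hIs
              simp [pvF, h1, hIs']
            simp [hf]
        · -- contains "Page": skipped by both
          rw [pvCanon]
          simp only [List.headD_cons]
          rw [if_neg h1, if_pos hIs]
          refine step (by rw [hpk, hIs]; simp) acc ?_
          have hf : pvF (a :: as) = none := by
            have hIs' : PySem.Chars.isIn ['P','a','g','e'] a.toList = true := by
              simpa using hIs
            simp [pvF, hIs']
          simp [hf]

-- names for the two pieces of get_contact_alt, so the proofs can speak about them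
lemma alt_eq_pieces (rl : List (List String)) (i : Int) :
    get_contact_alt rl i =
      ((PySem.List.slice rl (some (i + 1)) (some (pvB rl (i + 1)))).filterMap pvF,
        pvB rl (i + 1)) := rfl

-- ===== VERDICT (by name: the statement is the Claim_ definition above) =====
theorem get_contact_spec : Claim_equal_get_contact := by
  intro rl i _ hpre
  obtain ⟨hi, hrows⟩ := hpre
  have hk : (i + 1) = (((i + 1).toNat : Nat) : Int) := (Int.toNat_of_nonneg (by omega)).symm
  unfold Spec_get_contact
  rw [alt_eq_pieces, get_contact, hk]
  rw [loopA_eq_canon rl rl.length (i + 1).toNat [] (by omega) hrows]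
  have hB := altB_eq_canon rl rl.length (i + 1).toNat [] (by omega) hrows
  simp only [List.nil_append] at hB
  exact hB.symm
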